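-- pv_equiv track=rewrite | github.com/jayasurya-n/Leetcode | Daily_Problems/2025/June/q23.py | kMirror
-- ===== SOURCE A (Python) =====
-- def kMirror(k: int, n: int) -> int:
--     # q = deque([[]])
--     # ans = 0
--
--     # def check(num_string):
--     #     l = len(num_string)
--     #     num = 0
--     #     for i in range(l):
--     #         num+=k**(l-1-i)*int(num_string[i])
--
--     #     return str(num)==str(num)[::-1],num
--
--     # n+=1
--     # while n>0:
--     #     num_string = q.popleft()
--     #     if(num_string==['0']):continue
--     #     l = len(num_string)
--     #     if(l%2==1):
--     #         half = num_string[:(l+1)//2]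
--     #         new = half+half[::-1]
--     #         q.append(new)
--     #         bool,num = check(new)
--     #         if(bool):
--     #             ans+=num
--     #             n-=1
--     #         if(n==0):break
--     #     else:
--     #         half = num_string[:l//2]
--     #         for middle in range(k):
--     #             new = half+[str(middle)]+half[::-1]
--     #             q.append(new)
--     #             bool,num = check(new)
--     #             if(bool):
--     #                 ans+=num
--     #                 n-=1
--     #             if(n==0):break
--
--     # return ans
--
--     ans = 0
--     start = 1
--
--     def check(num):
--         k_binary = []
--         while num:
--             k_binary.append(num%k)
--             num//=k
--         return k_binary==k_binary[::-1]
--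
--     while n>0:
--         for op in [0,1]:
--             if(n==0):break
--             for num in range(start,10*start):
--                 new = temp = num
--                 if(op==0):temp//=10
--                 while temp:
--                     new*=10
--                     new+=temp%10
--                     temp//=10
--
--                 if(check(new)):
--                     ans+=new
--                     n-=1
--                 if(n==0):break
--         start*=10
--
--     return ans
-- ===== SOURCE B (Python) =====
-- def kMirror(k: int, n: int) -> int:
--     def rev(m, b):
--         r = 0
--         while m:
--             r = r * b + m % b
--             m //= b
--         return r
--
--     def pals(length):
--         # palindromic decimal digit lists of this length (leading zeros allowed),
--         # in increasing lexicographic = numeric order, built recursively by wrapping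
--         if length <= 0:
--             yield []
--         elif length == 1:
--             for d in range(10):
--                 yield [d]
--         else:
--             for d in range(10):
--                 for inner in pals(length - 2):
--                     yield [d] + inner + [d]
--
--     def value(digs):
--         v = 0
--         for d in digs:
--             v = 10 * v + d
--         return v
--
--     total = 0
--     length = 1
--     while n > 0:
--         for p in pals(length):
--             if p[0] == 0:
--                 continue
--             v = value(p)
--             if rev(v, k) == v:
--                 total += v
--                 n -= 1
--                 if n == 0:
--                     break
--         length += 1
--     return total
-- ===== Notes on version B (the rewrite author's own statement) =====
-- stated objective: alternative
-- what changed: B generates the candidate palindromes as digit lists by a recursive wrap-construction (pals(L) yields d ++ inner-palindrome ++ d over a generator, skipping leading zeros) and tests base-k palindromicity by numeric base-k reversal, instead of A's per-decade numeric half-mirroring loop and its build-a-digit-list-and-compare-with-reverse check.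
-- outside the precondition, e.g. on kMirror(-2, 1): A returns 1, B returns 1; on kMirror(0, 1): A raises ZeroDivisionError, B raises ZeroDivisionError
import Mathlib
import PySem

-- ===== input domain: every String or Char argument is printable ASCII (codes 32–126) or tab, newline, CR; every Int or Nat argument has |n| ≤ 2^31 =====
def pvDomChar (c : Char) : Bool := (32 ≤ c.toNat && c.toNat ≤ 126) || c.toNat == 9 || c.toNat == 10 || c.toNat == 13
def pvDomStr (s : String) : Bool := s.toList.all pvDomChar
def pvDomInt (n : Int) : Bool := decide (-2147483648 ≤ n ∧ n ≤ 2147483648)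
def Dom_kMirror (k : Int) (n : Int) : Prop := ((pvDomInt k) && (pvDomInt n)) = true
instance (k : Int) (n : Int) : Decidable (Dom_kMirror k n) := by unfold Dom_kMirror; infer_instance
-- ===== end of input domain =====

-- B generates the decimal candidate palindromes by a recursive wrap-construction on digit
-- lists and tests base-k palindromicity by numeric base-k reversal, instead of A's
-- per-decade numeric half-mirroring and digit-list comparison (alternative; no speed claim).
-- Both outer while-loops carry a fuel of decades/lengths — a totality guard only.

-- floor-division facts used by the termination proofs of both ports
theorem pvFdFacts (b m : Int) (hb : 2 ≤ b) (hm : 0 < m) :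
    0 ≤ PySem.Int.floordiv m b ∧ PySem.Int.floordiv m b < m := by
  rw [PySem.Int.floordiv_eq_ediv_of_pos (by omega)]
  refine ⟨Int.ediv_nonneg (by omega) (by omega), ?_⟩
  rw [Int.ediv_lt_iff_lt_mul (by omega)]
  nlinarith

-- ===== PORT A =====

-- A's check loop: the k_binary digit list (little-endian).  The guard `0 < num ∧ 2 ≤ k`
-- is a totality guard: A only calls check with num ≥ 1, and for k < 2 Python raises
-- (k = 0) or diverges (k = 1) — those inputs are excluded by Pre_kMirror.
def kDigitsA (k : Int) (num : Int) : List Int :=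
  if h : 0 < num ∧ 2 ≤ k then
    PySem.Int.mod num k :: kDigitsA k (PySem.Int.floordiv num k)
  else []
termination_by num.toNat
decreasing_by have := pvFdFacts k num h.2 h.1; omega

-- return k_binary == k_binary[::-1]
def checkA (k : Int) (num : Int) : Bool :=
  kDigitsA k num = (kDigitsA k num).reverse

-- while temp: new = new*10 + temp%10; temp //= 10   (temp is never negative in A)
def mirrorA (newv : Int) (temp : Int) : Int :=
  if h : 0 < temp then
    mirrorA (newv * 10 + PySem.Int.mod temp 10) (PySem.Int.floordiv temp 10)
  else newv
termination_by temp.toNat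
decreasing_by have := pvFdFacts 10 temp (by omega) h; omega

-- for num in range(start, 10*start): … ; if n == 0: break
def innerA (k : Int) (op : Int) : List Int → Int → Int → Int × Int
  | [], n, ans => (n, ans)
  | num :: rest, n, ans =>
    let temp := if op = 0 then PySem.Int.floordiv num 10 else num
    let neww := mirrorA num temp
    let r := if checkA k neww then (n - 1, ans + neww) else (n, ans)
    if r.1 = 0 then r else innerA k op rest r.1 r.2

-- while n > 0: for op in [0,1]: if n == 0: break; for num in range(start,10*start): …; start *= 10
def loopA (k : Int) : Nat → Int → Int → Int → Int
  | 0, _, _, ans => ans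
  | fuel + 1, n, start, ans =>
    if 0 < n then
      let r1 := if n = 0 then (n, ans)
                else innerA k 0 (PySem.List.pyRange start (10 * start) 1) n ans
      let r2 := if r1.1 = 0 then r1
                else innerA k 1 (PySem.List.pyRange start (10 * start) 1) r1.1 r1.2
      loopA k fuel r2.1 (start * 10) r2.2
    else ans

def kMirror (k : Int) (n : Int) : Int := loopA k 1000000000 n 1 0

-- ===== PORT B =====

-- rev(m, b): r = 0; while m: r = r*b + m%b; m //= b.  The guard `0 < m ∧ 2 ≤ b` is a
-- totality guard: B only calls rev with m ≥ 0 and base k, with 2 ≤ k under Pre_.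
def revGoB (b : Int) (r : Int) (m : Int) : Int :=
  if h : 0 < m ∧ 2 ≤ b then
    revGoB b (r * b + PySem.Int.mod m b) (PySem.Int.floordiv m b)
  else r
termination_by m.toNat
decreasing_by have := pvFdFacts b m h.2 h.1; omega

-- Totality guard: for b ≤ 1 Python's rev raises (b = 0), diverges (b = 1) or is
-- reached only outside Pre_ (negative bases); returning m there keeps the port's outer
-- loop terminating.  For 2 ≤ b (everything Pre_ admits) this is exactly B's rev loop.
def revB (m : Int) (b : Int) : Int := if b ≤ 1 then m else revGoB b 0 m

-- pals(length): palindromic digit lists of the given length (leading zeros allowed) in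
-- increasing order, built by wrapping a digit around the shorter palindromes
def palsB (len : Int) : List (List Int) :=
  if h : 2 ≤ len then
    (PySem.List.pyRange 0 10 1).flatMap
      (fun d => (palsB (len - 2)).map (fun inner => d :: inner ++ [d]))
  else if len = 1 then (PySem.List.pyRange 0 10 1).map (fun d => [d])
  else [[]]
termination_by len.toNat
decreasing_by omega

-- value(digs): v = 0; for d in digs: v = 10*v + d
def valueB (digs : List Int) : Int := digs.foldl (fun v d => 10 * v + d) 0

-- for p in pals(length): if p[0] == 0: continue; v = value(p); if rev(v,k) == v: …
def innerB (k : Int) : List (List Int) → Int → Int → Int × Int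
  | [], n, t => (n, t)
  | p :: rest, n, t =>
    if PySem.List.pyGet? p 0 = some 0 then innerB k rest n t
    else
      let v := valueB p
      if revB v k = v then
        if n - 1 = 0 then (n - 1, t + v) else innerB k rest (n - 1) (t + v)
      else innerB k rest n t

-- while n > 0: for p in pals(length): …; length += 1
def loopB (k : Int) : Nat → Int → Int → Int → Int
  | 0, _, _, t => t
  | fuel + 1, n, len, t =>
    if 0 < n then
      let r := innerB k (palsB len) n t
      loopB k fuel r.1 (len + 1) r.2
    else t

def kMirror_alt (k : Int) (n : Int) : Int := loopB k 2000000000 n 1 0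

-- ===== PRECONDITION & SPEC =====
-- Pre_ excludes k < 2 with n ≥ 1: there A raises ZeroDivisionError (k = 0) or diverges
-- (k = 1), and for negative k the digit loops' floor-division behaviour is an accident
-- outside the function's base-k (2 ≤ k) domain — at the cited sample A and B agree.
def Pre_kMirror (k : Int) (n : Int) : Prop := 2 ≤ k ∨ n ≤ 0
instance (k : Int) (n : Int) : Decidable (Pre_kMirror k n) := by
  unfold Pre_kMirror; infer_instance

def pvWitness_kMirror : Int × Int := (2, 3)

def Spec_kMirror (k : Int) (n : Int) (out : Int) : Prop := out = kMirror_alt k n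
instance (k : Int) (n : Int) (out : Int) : Decidable (Spec_kMirror k n out) := by
  unfold Spec_kMirror; infer_instance

-- ===== CLAIM (what is proved, stated in full; the proofs are below) =====
def Claim_equal_kMirror : Prop :=
  ∀ (k : Int) (n : Int), Dom_kMirror k n → Pre_kMirror k n → Spec_kMirror k n (kMirror k n)

-- ===== LEMMAS AND PROOFS =====

-- proof-side: the processor both inner loops reduce to, over the candidate VALUE list
def procP (k : Int) : List Int → Int → Int → Int × Int
  | [], n, t => (n, t)
  | v :: rest, n, t =>
    if revB v k = v then
      if n - 1 = 0 then (n - 1, t + v) else procP k rest (n - 1) (t + v)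
    else procP k rest n t

-- [0, 1, …, M-1] as integers (proof-side image of both half-ranges)
def natListP (M : Nat) : List Int := (List.range M).map (fun i : Nat => (i : Int))

-- reversal of exactly c decimal digits (leading zeros kept), proof-side
def revFixP : Nat → Int → Int → Int
  | 0, acc, _ => acc
  | c + 1, acc, m => revFixP c (acc * 10 + m % 10) (m / 10)

-- digit count of m in base b (proof-side measure of the digit loops)
def ndB (b : Int) (m : Int) : Nat :=
  if h : 0 < m ∧ 2 ≤ b then ndB b (PySem.Int.floordiv m b) + 1 else 0
termination_by m.toNat
decreasing_by have := pvFdFacts b m h.2 h.1; omega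

-- value of a little-endian base-b digit list
def valB (b : Int) (L : List Int) : Int := L.foldr (fun d a => d + b * a) 0

-- rev's accumulator splits off as r * b^(digit count)
theorem revGo_shift_aux (b : Int) :
    ∀ N : Nat, ∀ r m : Int, m.toNat ≤ N →
      revGoB b r m = r * b ^ ndB b m + revGoB b 0 m := by
  intro N
  induction N with
  | zero =>
    intro r m hm
    have h : ¬(0 < m ∧ 2 ≤ b) := by omega
    rw [revGoB, dif_neg h, revGoB, dif_neg h, ndB, dif_neg h]
    ring
  | succ N ih =>
    intro r m hm
    by_cases h : 0 < m ∧ 2 ≤ b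
    · have hf := pvFdFacts b m h.2 h.1
      have hle : (PySem.Int.floordiv m b).toNat ≤ N := by omega
      rw [revGoB, dif_pos h]
      conv_rhs => rw [revGoB, dif_pos h]
      rw [ndB, dif_pos h]
      rw [ih (r * b + PySem.Int.mod m b) _ hle, ih (0 * b + PySem.Int.mod m b) _ hle]
      ring
    · rw [revGoB, dif_neg h, revGoB, dif_neg h, ndB, dif_neg h]
      ring

theorem revGo_shift (b r m : Int) :
    revGoB b r m = r * b ^ ndB b m + revGoB b 0 m :=
  revGo_shift_aux b m.toNat r m le_rfl

theorem revGo_nonneg_aux (b : Int) :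
    ∀ N : Nat, ∀ r m : Int, m.toNat ≤ N → 0 ≤ r → 0 ≤ m → 0 ≤ revGoB b r m := by
  intro N
  induction N with
  | zero =>
    intro r m hm hr _
    have h : ¬(0 < m ∧ 2 ≤ b) := by omega
    rw [revGoB, dif_neg h]; exact hr
  | succ N ih =>
    intro r m hm hr hm0
    by_cases h : 0 < m ∧ 2 ≤ b
    · have hf := pvFdFacts b m h.2 h.1
      rw [revGoB, dif_pos h]
      apply ih _ _ (by omega) _ hf.1
      have hmod : 0 ≤ PySem.Int.mod m b := by
        rw [PySem.Int.mod_eq_emod_of_pos (by omega)]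
        exact Int.emod_nonneg m (by omega)
      have : 0 ≤ r * b := mul_nonneg hr (by omega)
      omega
    · rw [revGoB, dif_neg h]; exact hr

theorem revGo_nonneg (b r m : Int) (hr : 0 ≤ r) (hm : 0 ≤ m) : 0 ≤ revGoB b r m :=
  revGo_nonneg_aux b m.toNat r m le_rfl hr hm

-- A's mirror loop in closed form: new * 10^digits(temp) + reversal of temp
theorem mirror_eq_aux :
    ∀ N : Nat, ∀ nv t : Int, t.toNat ≤ N →
      mirrorA nv t = nv * 10 ^ ndB 10 t + revGoB 10 0 t := by
  intro N
  induction N with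
  | zero =>
    intro nv t ht
    have h : ¬ 0 < t := by omega
    have h' : ¬(0 < t ∧ (2:Int) ≤ 10) := by omega
    rw [mirrorA, dif_neg h, ndB, dif_neg h', revGoB, dif_neg h']
    ring
  | succ N ih =>
    intro nv t ht
    by_cases h : 0 < t
    · have h' : 0 < t ∧ (2:Int) ≤ 10 := ⟨h, by omega⟩
      have hf := pvFdFacts 10 t (by omega) h
      rw [mirrorA, dif_pos h]
      conv_rhs => rw [revGoB, dif_pos h']
      rw [ndB, dif_pos h']
      rw [ih (nv * 10 + PySem.Int.mod t 10) _ (by omega)]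
      rw [revGo_shift 10 (0 * 10 + PySem.Int.mod t 10) (PySem.Int.floordiv t 10)]
      ring
    · have h' : ¬(0 < t ∧ (2:Int) ≤ 10) := by omega
      rw [mirrorA, dif_neg h, ndB, dif_neg h', revGoB, dif_neg h']
      ring

theorem mirror_eq (nv t : Int) :
    mirrorA nv t = nv * 10 ^ ndB 10 t + revGoB 10 0 t :=
  mirror_eq_aux t.toNat nv t le_rfl

-- the digit list evaluates back to the number
theorem kDigitsA_val_aux (k : Int) (hk : 2 ≤ k) :
    ∀ N : Nat, ∀ m : Int, m.toNat ≤ N → 0 ≤ m → valB k (kDigitsA k m) = m := by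
  intro N
  induction N with
  | zero =>
    intro m hm hm0
    have h : ¬(0 < m ∧ 2 ≤ k) := by omega
    rw [kDigitsA, dif_neg h]
    simp [valB]; omega
  | succ N ih =>
    intro m hm hm0
    by_cases h : 0 < m ∧ 2 ≤ k
    · have hf := pvFdFacts k m h.2 h.1
      rw [kDigitsA, dif_pos h]
      have hcons : valB k (PySem.Int.mod m k :: kDigitsA k (PySem.Int.floordiv m k))
          = PySem.Int.mod m k + k * valB k (kDigitsA k (PySem.Int.floordiv m k)) := by
        simp [valB]
      rw [hcons, ih _ (by omega) hf.1]
      rw [PySem.Int.mod_eq_emod_of_pos (by omega), PySem.Int.floordiv_eq_ediv_of_pos (by omega)]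
      have := Int.mul_ediv_add_emod m k
      linarith
    · rw [kDigitsA, dif_neg h]
      simp [valB]; omega

theorem kDigitsA_val (k : Int) (hk : 2 ≤ k) (m : Int) (hm : 0 ≤ m) :
    valB k (kDigitsA k m) = m :=
  kDigitsA_val_aux k hk m.toNat m le_rfl hm

-- length of the digit list is the digit count
theorem kDigitsA_len_aux (k : Int) :
    ∀ N : Nat, ∀ m : Int, m.toNat ≤ N → (kDigitsA k m).length = ndB k m := by
  intro N
  induction N with
  | zero =>
    intro m hm
    have h : ¬(0 < m ∧ 2 ≤ k) := by omega
    rw [kDigitsA, dif_neg h, ndB, dif_neg h]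
    rfl
  | succ N ih =>
    intro m hm
    by_cases h : 0 < m ∧ 2 ≤ k
    · have hf := pvFdFacts k m h.2 h.1
      rw [kDigitsA, dif_pos h, ndB, dif_pos h]
      rw [List.length_cons, ih (PySem.Int.floordiv m k) (by omega)]
    · rw [kDigitsA, dif_neg h, ndB, dif_neg h]
      rfl

theorem kDigitsA_len (k m : Int) : (kDigitsA k m).length = ndB k m :=
  kDigitsA_len_aux k m.toNat m le_rfl

-- every digit lies in [0, k)
theorem kDigitsA_bounds_aux (k : Int) :
    ∀ N : Nat, ∀ m : Int, m.toNat ≤ N → ∀ d ∈ kDigitsA k m, 0 ≤ d ∧ d < k := by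
  intro N
  induction N with
  | zero =>
    intro m hm
    have h : ¬(0 < m ∧ 2 ≤ k) := by omega
    rw [kDigitsA, dif_neg h]
    simp
  | succ N ih =>
    intro m hm d hd
    by_cases h : 0 < m ∧ 2 ≤ k
    · have hf := pvFdFacts k m h.2 h.1
      rw [kDigitsA, dif_pos h] at hd
      rcases List.mem_cons.mp hd with hd | hd
      · subst hd
        rw [PySem.Int.mod_eq_emod_of_pos (by omega)]
        exact ⟨Int.emod_nonneg m (by omega), Int.emod_lt_of_pos m (by omega)⟩
      · exact ih _ (by omega) d hd
    · rw [kDigitsA, dif_neg h] at hd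
      simp at hd

theorem kDigitsA_bounds (k m : Int) : ∀ d ∈ kDigitsA k m, 0 ≤ d ∧ d < k :=
  kDigitsA_bounds_aux k m.toNat m le_rfl

-- value of L ++ [d]
theorem val_append (b : Int) (L : List Int) (d : Int) :
    valB b (L ++ [d]) = valB b L + d * b ^ L.length := by
  induction L with
  | nil => simp [valB]
  | cons a t ih =>
    have h1 : valB b ((a :: t) ++ [d]) = a + b * valB b (t ++ [d]) := by simp [valB]
    have h2 : valB b (a :: t) = a + b * valB b t := by simp [valB]
    rw [h1, ih, h2, List.length_cons, pow_succ]
    ring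

-- B's reversal is the value of the reversed digit list
theorem rev_val_aux (k : Int) (hk : 2 ≤ k) :
    ∀ N : Nat, ∀ m : Int, m.toNat ≤ N → 0 ≤ m →
      revGoB k 0 m = valB k (kDigitsA k m).reverse := by
  intro N
  induction N with
  | zero =>
    intro m hm hm0
    have h : ¬(0 < m ∧ 2 ≤ k) := by omega
    rw [revGoB, dif_neg h, kDigitsA, dif_neg h]
    simp [valB]
  | succ N ih =>
    intro m hm hm0
    by_cases h : 0 < m ∧ 2 ≤ k
    · have hf := pvFdFacts k m h.2 h.1
      rw [revGoB, dif_pos h, kDigitsA, dif_pos h]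
      rw [revGo_shift k (0 * k + PySem.Int.mod m k) (PySem.Int.floordiv m k)]
      rw [ih _ (by omega) hf.1]
      rw [List.reverse_cons, val_append, List.length_reverse, kDigitsA_len]
      ring
    · rw [revGoB, dif_neg h, kDigitsA, dif_neg h]
      simp [valB]

theorem rev_val (k : Int) (hk : 2 ≤ k) (m : Int) (hm : 0 ≤ m) :
    revGoB k 0 m = valB k (kDigitsA k m).reverse :=
  rev_val_aux k hk m.toNat m le_rfl hm

-- base-k values determine bounded digit lists of equal length
theorem val_inj (k : Int) (hk : 2 ≤ k) :
    ∀ (L1 L2 : List Int), L1.length = L2.length →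
      (∀ d ∈ L1, 0 ≤ d ∧ d < k) → (∀ d ∈ L2, 0 ≤ d ∧ d < k) →
      valB k L1 = valB k L2 → L1 = L2 := by
  intro L1
  induction L1 with
  | nil =>
    intro L2 hlen _ _ _
    cases L2 with
    | nil => rfl
    | cons a2 t2 => simp at hlen
  | cons a t ih =>
    intro L2 hlen hb1 hb2 hv
    cases L2 with
    | nil => simp at hlen
    | cons a2 t2 =>
      have hv' : a + k * valB k t = a2 + k * valB k t2 := by simpa [valB] using hv
      have ha1 := hb1 a (by simp)
      have ha2 := hb2 a2 (by simp)
      have key : a = a2 := by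
        have e1 : (a + k * valB k t) % k = a := by
          rw [Int.add_mul_emod_self_left]
          exact Int.emod_eq_of_lt ha1.1 ha1.2
        have e2 : (a2 + k * valB k t2) % k = a2 := by
          rw [Int.add_mul_emod_self_left]
          exact Int.emod_eq_of_lt ha2.1 ha2.2
        rw [← e1, ← e2, hv']
      have h5 : k * valB k t = k * valB k t2 := by
        rw [key] at hv'; linarith
      have h6 := mul_left_cancel₀ (show k ≠ 0 by omega) h5
      rw [key, ih t2 (by simpa using hlen) (fun d hd => hb1 d (by simp [hd]))
        (fun d hd => hb2 d (by simp [hd])) h6]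

-- A's digit-list palindrome test agrees with B's numeric-reversal test
theorem checkA_iff (k m : Int) (hk : 2 ≤ k) (hm : 0 ≤ m) :
    checkA k m = true ↔ revB m k = m := by
  unfold checkA revB
  rw [if_neg (show ¬ k ≤ 1 by omega), decide_eq_true_iff]
  constructor
  · intro hpal
    rw [rev_val k hk m hm, ← hpal, kDigitsA_val k hk m hm]
  · intro hrev
    have h1 : valB k (kDigitsA k m) = valB k (kDigitsA k m).reverse := by
      rw [← rev_val k hk m hm, hrev, kDigitsA_val k hk m hm]
    exact val_inj k hk (kDigitsA k m) (kDigitsA k m).reverse (by simp)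
      (kDigitsA_bounds k m)
      (fun d hd => kDigitsA_bounds k m d (List.mem_reverse.mp hd)) h1

-- ----- fixed-width decimal reversal -----

-- reversing c+1 digits peels the leading digit off at the end
theorem revFix_split :
    ∀ (c : Nat) (acc d r : Int), 0 ≤ d → d < 10 → 0 ≤ r → r < 10 ^ c →
      revFixP (c + 1) acc (d * 10 ^ c + r) = (revFixP c acc r) * 10 + d := by
  intro c
  induction c with
  | zero =>
    intro acc d r hd0 hd9 hr0 hrc
    have hr : r = 0 := by simp at hrc; omega
    subst hr
    simp only [revFixP, pow_zero, mul_one, add_zero]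
    rw [Int.emod_eq_of_lt hd0 hd9]
  | succ c ih =>
    intro acc d r hd0 hd9 hr0 hrc
    have e1 : (d * 10 ^ (c + 1) + r) % 10 = r % 10 := by
      rw [show d * 10 ^ (c + 1) + r = r + 10 * (d * 10 ^ c) by ring,
        Int.add_mul_emod_self_left]
    have e2 : (d * 10 ^ (c + 1) + r) / 10 = d * 10 ^ c + r / 10 := by
      rw [show d * 10 ^ (c + 1) + r = r + 10 * (d * 10 ^ c) by ring,
        Int.add_mul_ediv_left r _ (by norm_num)]
      ring
    show revFixP (c + 1) (acc * 10 + (d * 10 ^ (c + 1) + r) % 10)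
        ((d * 10 ^ (c + 1) + r) / 10) = _
    rw [e1, e2, ih (acc * 10 + r % 10) d (r / 10) hd0 hd9
      (Int.ediv_nonneg hr0 (by norm_num))
      (by rw [Int.ediv_lt_iff_lt_mul (by norm_num)]; nlinarith [pow_succ (10:Int) c])]
    rfl

-- on an exact-width number the fixed-width reversal is B's rev loop
theorem revFix_eq_revGo :
    ∀ (c : Nat) (acc m : Int), 0 ≤ m → m < 10 ^ c → (10 ^ c ≤ 10 * m ∨ c = 0) →
      revFixP c acc m = revGoB 10 acc m := by
  intro c
  induction c with
  | zero =>
    intro acc m hm0 hmc _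
    have hm : m = 0 := by simp at hmc; omega
    subst hm
    rw [revFixP, revGoB, dif_neg (by omega)]
  | succ c ih =>
    intro acc m hm0 hmc hcond
    have hpow : (0:Int) < 10 ^ c := by positivity
    have hm : 0 < m := by
      rcases hcond with h | h
      · nlinarith [pow_succ (10:Int) c]
      · omega
    rw [revGoB, dif_pos ⟨hm, by norm_num⟩,
      PySem.Int.mod_eq_emod_of_pos (by norm_num), PySem.Int.floordiv_eq_ediv_of_pos (by norm_num)]
    show revFixP c (acc * 10 + m % 10) (m / 10) = _
    apply ih
    · exact Int.ediv_nonneg hm0 (by norm_num)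
    · rw [Int.ediv_lt_iff_lt_mul (by norm_num)]; nlinarith [pow_succ (10:Int) c]
    · cases c with
      | zero => right; rfl
      | succ c' =>
        left
        have h1 : 10 ^ (c' + 1 + 1) ≤ 10 * m := by
          rcases hcond with h | h
          · exact h
          · omega
        have h2 : (10:Int) ^ (c' + 1) ≤ m := by nlinarith [pow_succ (10:Int) (c' + 1)]
        have h3 : (10:Int) ^ c' ≤ m / 10 := by
          rw [Int.le_ediv_iff_mul_le (by norm_num)]
          nlinarith [pow_succ (10:Int) c']
        nlinarith [pow_succ (10:Int) c']

-- an exact-width number has exactly c digits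
theorem ndB_eq_width :
    ∀ (c : Nat) (m : Int), 0 ≤ m → m < 10 ^ c → (10 ^ c ≤ 10 * m ∨ c = 0) →
      ndB 10 m = c := by
  intro c
  induction c with
  | zero =>
    intro m hm0 hmc _
    have hm : m = 0 := by simp at hmc; omega
    subst hm
    rw [ndB, dif_neg (by omega)]
  | succ c ih =>
    intro m hm0 hmc hcond
    have hpow : (0:Int) < 10 ^ c := by positivity
    have hm : 0 < m := by
      rcases hcond with h | h
      · nlinarith [pow_succ (10:Int) c]
      · omega
    rw [ndB, dif_pos ⟨hm, by norm_num⟩, PySem.Int.floordiv_eq_ediv_of_pos (by norm_num)]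
    congr 1
    apply ih
    · exact Int.ediv_nonneg hm0 (by norm_num)
    · rw [Int.ediv_lt_iff_lt_mul (by norm_num)]; nlinarith [pow_succ (10:Int) c]
    · cases c with
      | zero => right; rfl
      | succ c' =>
        left
        have h1 : 10 ^ (c' + 1 + 1) ≤ 10 * m := by
          rcases hcond with h | h
          · exact h
          · omega
        have h2 : (10:Int) ^ (c' + 1) ≤ m := by nlinarith [pow_succ (10:Int) (c' + 1)]
        have h3 : (10:Int) ^ c' ≤ m / 10 := by
          rw [Int.le_ediv_iff_mul_le (by norm_num)]
          nlinarith [pow_succ (10:Int) c']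
        nlinarith [pow_succ (10:Int) c']

-- ----- B's value fold -----

theorem foldl_shift :
    ∀ (p : List Int) (a : Int),
      p.foldl (fun v d => 10 * v + d) a
        = a * 10 ^ p.length + p.foldl (fun v d => 10 * v + d) 0 := by
  intro p
  induction p with
  | nil => intro a; simp
  | cons d t ih =>
    intro a
    rw [List.foldl_cons, List.foldl_cons, ih (10 * a + d), ih (10 * 0 + d),
      List.length_cons]
    ring

theorem valueB_wrap (d : Int) (p : List Int) :
    valueB (d :: p ++ [d]) = d * 10 ^ (p.length + 1) + 10 * valueB p + d := by
  unfold valueB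
  simp only [List.foldl_cons, List.foldl_append, List.foldl_nil]
  rw [foldl_shift p (10 * 0 + d)]
  ring

-- ----- structure of palsB -----

theorem palsB_length_aux :
    ∀ (N : Nat) (L : Int), L.toNat ≤ N → 0 ≤ L → ∀ p ∈ palsB L, p.length = L.toNat := by
  intro N
  induction N with
  | zero =>
    intro L hN hL p hp
    have h2 : ¬ 2 ≤ L := by omega
    rw [palsB, dif_neg h2] at hp
    by_cases h1 : L = 1
    · omega
    · rw [if_neg h1] at hp
      simp at hp
      subst hp
      simp
      omega
  | succ N ih =>
    intro L hN hL p hp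
    by_cases h2 : 2 ≤ L
    · rw [palsB, dif_pos h2] at hp
      simp only [List.mem_flatMap, List.mem_map] at hp
      obtain ⟨d, _, inner, hinner, hpe⟩ := hp
      subst hpe
      have := ih (L - 2) (by omega) (by omega) inner hinner
      simp [this]
      omega
    · rw [palsB, dif_neg h2] at hp
      by_cases h1 : L = 1
      · subst h1
        rw [if_pos rfl] at hp
        simp only [List.mem_map] at hp
        obtain ⟨d, _, hpe⟩ := hp
        subst hpe
        simp
      · rw [if_neg h1] at hp
        simp at hp
        subst hp
        simp
        omega

theorem palsB_length (L : Int) (hL : 0 ≤ L) : ∀ p ∈ palsB L, p.length = L.toNat :=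
  palsB_length_aux L.toNat L le_rfl hL

theorem palsB_ne_nil (L : Int) (hL : 1 ≤ L) : ∀ p ∈ palsB L, p ≠ [] := by
  intro p hp hnil
  have := palsB_length L (by omega) p hp
  rw [hnil] at this
  simp at this
  omega

-- ----- natListP -----

theorem mem_natList (M : Nat) (x : Int) (hx : x ∈ natListP M) : 0 ≤ x ∧ x < M := by
  unfold natListP at hx
  rw [List.mem_map] at hx
  obtain ⟨i, hi, rfl⟩ := hx
  rw [List.mem_range] at hi
  omega

theorem natList_eq_pyRange (M : Nat) : PySem.List.pyRange 0 (M : Int) 1 = natListP M := by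
  rw [PySem.List.pyRange_one]
  have hM : ((M : Int) - 0).toNat = M := by omega
  rw [hM]
  unfold natListP
  apply List.map_congr_left
  intro k _
  simp

theorem range_mul_flat (K M : Nat) :
    List.range (K * M)
      = (List.range K).flatMap (fun d => (List.range M).map (fun r => d * M + r)) := by
  induction K with
  | zero => simp
  | succ K ih =>
    rw [Nat.succ_mul, List.range_add, ih, List.range_succ, List.flatMap_append]
    simp [Nat.add_comm]

theorem natList_flat (M : Nat) :
    natListP (10 * M)
      = (PySem.List.pyRange 0 10 1).flatMap
          (fun d => (natListP M).map (fun r => d * (M : Int) + r)) := by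
  have h10 : PySem.List.pyRange 0 (10:Int) 1 = natListP 10 := by
    have := natList_eq_pyRange 10
    simpa using this
  rw [h10]
  unfold natListP
  rw [range_mul_flat, List.map_flatMap, List.flatMap_map]
  apply List.flatMap_congr
  intro d _
  rw [List.map_map, List.map_map]
  apply List.map_congr_left
  intro r _
  simp

-- ----- the two enumeration claims -----

theorem pals_step (L : Int) (hL : 0 ≤ L) (h : Nat) (f g : Int → Int)
    (hv : (palsB L).map valueB = (natListP (10 ^ h)).map f)
    (hg : ∀ d r : Int, 0 ≤ d → d < 10 → 0 ≤ r → r < 10 ^ h →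
        g (d * 10 ^ h + r) = d * 10 ^ (L.toNat + 1) + 10 * f r + d) :
    (palsB (L + 2)).map (fun p => (p.headD 0, valueB p))
      = (natListP (10 ^ (h + 1))).map (fun x => (x / 10 ^ h, g x)) := by
  rw [palsB, dif_pos (show (2:Int) ≤ L + 2 by omega),
    show L + 2 - 2 = L by ring, List.map_flatMap,
    show (10:Nat) ^ (h + 1) = 10 * 10 ^ h by ring, natList_flat, List.map_flatMap]
  apply List.flatMap_congr
  intro d hd
  obtain ⟨hd0, hd10⟩ := PySem.List.mem_pyRange_one.mp hd
  rw [List.map_map, List.map_map]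
  have hcast : (((10:Nat) ^ h : Nat) : Int) = (10:Int) ^ h := by push_cast; rfl
  have hstep1 : (palsB L).map ((fun p => (p.headD 0, valueB p)) ∘ (fun inner => d :: inner ++ [d]))
      = (palsB L).map ((fun v => (d, d * 10 ^ (L.toNat + 1) + 10 * v + d)) ∘ valueB) := by
    apply List.map_congr_left
    intro inner hin
    have hlen := palsB_length L hL inner hin
    simp only [Function.comp_apply]
    rw [valueB_wrap, hlen]
    rfl
  rw [hstep1, ← List.map_map, hv, List.map_map]
  apply List.map_congr_left
  intro r hr
  obtain ⟨hr0, hrM⟩ := mem_natList _ _ hr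
  rw [hcast] at hrM
  simp only [Function.comp_apply, hcast]
  have hediv : (d * (10:Int) ^ h + r) / 10 ^ h = d := by
    rw [show d * (10:Int) ^ h + r = r + 10 ^ h * d by ring,
      Int.add_mul_ediv_left _ _ (show ((10:Int) ^ h) ≠ 0 by positivity),
      Int.ediv_eq_zero_of_lt hr0 hrM]
    ring
  rw [hediv, hg d r hd0 hd10 hr0 hrM]

theorem ediv_shift_pow (d r : Int) (c : Nat) (hr0 : 0 ≤ r) :
    (d * 10 ^ (c + 1) + r) / 10 = d * 10 ^ c + r / 10 := by
  rw [show d * 10 ^ (c + 1) + r = r + 10 * (d * 10 ^ c) by ring,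
    Int.add_mul_ediv_left r _ (by norm_num)]
  ring

theorem pals_odd :
    ∀ e : Nat, (palsB (2 * (e : Int) + 1)).map (fun p => (p.headD 0, valueB p))
      = (natListP (10 ^ (e + 1))).map
          (fun x => (x / 10 ^ e, x * 10 ^ e + revFixP e 0 (x / 10))) := by
  intro e
  induction e with
  | zero =>
    have hp1 : palsB 1 = (PySem.List.pyRange 0 10 1).map (fun d => [d]) := by
      rw [palsB, dif_neg (by norm_num), if_pos rfl]
    rw [show (2 * ((0 : Nat) : Int) + 1) = 1 by norm_num, hp1]
    decide
  | succ e ih =>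
    have hv := congrArg (List.map Prod.snd) ih
    simp only [List.map_map, Function.comp_def] at hv
    rw [show (2 * ((e + 1 : Nat) : Int) + 1) = (2 * (e : Int) + 1) + 2 by push_cast; ring]
    have := pals_step (2 * (e : Int) + 1) (by omega) (e + 1)
      (fun x => x * 10 ^ e + revFixP e 0 (x / 10))
      (fun x => x * 10 ^ (e + 1) + revFixP (e + 1) 0 (x / 10))
      hv ?hg
    · exact this
    case hg =>
      intro d r hd0 hd10 hr0 hrh
      beta_reduce
      have hdiv10 : r / 10 < 10 ^ e := by
        rw [Int.ediv_lt_iff_lt_mul (by norm_num)]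
        nlinarith [pow_succ (10:Int) e]
      rw [ediv_shift_pow d r e hr0,
        revFix_split e 0 d (r / 10) hd0 hd10 (Int.ediv_nonneg hr0 (by norm_num)) hdiv10,
        show (2 * (e : Int) + 1).toNat + 1 = 2 * e + 2 by omega]
      have hp : (10:Int) ^ (2 * e + 2) = 10 ^ (e + 1) * 10 ^ (e + 1) := by
        rw [← pow_add]; congr 1; omega
      rw [hp, pow_succ]
      ring

theorem pals_even :
    ∀ e : Nat, (palsB (2 * (e : Int) + 2)).map (fun p => (p.headD 0, valueB p))
      = (natListP (10 ^ (e + 1))).map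
          (fun x => (x / 10 ^ e, x * 10 ^ (e + 1) + revFixP (e + 1) 0 x)) := by
  intro e
  induction e with
  | zero =>
    have hp0 : palsB 0 = [[]] := by
      rw [palsB, dif_neg (by norm_num), if_neg (by norm_num)]
    rw [show (2 * ((0 : Nat) : Int) + 2) = 0 + 2 by norm_num]
    have := pals_step 0 le_rfl 0
      (fun x => x * 10 ^ 0 + revFixP 0 0 (x / 10))
      (fun x => x * 10 ^ (0 + 1) + revFixP (0 + 1) 0 x)
      (by rw [hp0]; decide) ?hg0
    · exact this
    case hg0 =>
      intro d r hd0 hd10 hr0 hrh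
      beta_reduce
      have hr : r = 0 := by simp at hrh; omega
      subst hr
      simp only [revFixP, pow_zero, Int.toNat_zero]
      rw [show d * 1 + 0 = d by ring, Int.emod_eq_of_lt hd0 hd10]
      ring
  | succ e ih =>
    have hv := congrArg (List.map Prod.snd) ih
    simp only [List.map_map, Function.comp_def] at hv
    rw [show (2 * ((e + 1 : Nat) : Int) + 2) = (2 * (e : Int) + 2) + 2 by push_cast; ring]
    have := pals_step (2 * (e : Int) + 2) (by omega) (e + 1)
      (fun x => x * 10 ^ (e + 1) + revFixP (e + 1) 0 x)
      (fun x => x * 10 ^ (e + 2) + revFixP (e + 2) 0 x)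
      hv ?hg
    · exact this
    case hg =>
      intro d r hd0 hd10 hr0 hrh
      beta_reduce
      rw [revFix_split (e + 1) 0 d r hd0 hd10 hr0 hrh,
        show (2 * (e : Int) + 2).toNat + 1 = 2 * e + 3 by omega]
      have hp : (10:Int) ^ (2 * e + 3) = 10 ^ (e + 1) * 10 ^ (e + 2) := by
        rw [← pow_add]; congr 1; omega
      have hq : (10:Int) ^ (e + 2) = 10 ^ (e + 1) * 10 := by
        rw [pow_succ]
      rw [hp, hq]
      ring

-- ----- filtered candidate lists -----

theorem filtmap (l : List (List Int)) :
    ((l.filter (fun p => p.headD 0 != 0)).map valueB)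
      = (((l.map (fun p => (p.headD 0, valueB p))).filter (fun q => q.1 != 0)).map
          Prod.snd) := by
  induction l with
  | nil => rfl
  | cons p t ih =>
    cases p with
    | nil => simpa using ih
    | cons a l =>
      by_cases h : a = 0
      · subst h; simpa using ih
      · simp only [List.headD_eq_head?_getD] at ih
        simp [h, ih]

theorem natList_filter_ge (M N : Nat) (hMN : M ≤ N) :
    (natListP N).filter (fun x => decide ((M : Int) ≤ x))
      = PySem.List.pyRange (M : Int) (N : Int) 1 := by
  rw [← natList_eq_pyRange,
    PySem.List.pyRange_one_append 0 (M : Int) (N : Int) (by positivity) (by exact_mod_cast hMN),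
    List.filter_append]
  have h1 : (PySem.List.pyRange 0 (M : Int) 1).filter (fun x => decide ((M : Int) ≤ x)) = [] := by
    apply List.filter_eq_nil_iff.mpr
    intro x hx
    have := PySem.List.mem_pyRange_one.mp hx
    simp
    omega
  have h2 : (PySem.List.pyRange (M : Int) (N : Int) 1).filter (fun x => decide ((M : Int) ≤ x))
      = PySem.List.pyRange (M : Int) (N : Int) 1 := by
    apply List.filter_eq_self.mpr
    intro x hx
    have := PySem.List.mem_pyRange_one.mp hx
    simp
    omega
  rw [h1, h2, List.nil_append]

theorem cand_core (e : Nat) (F : Int → Int × Int) (Gm : Int → Int)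
    (hsnd : ∀ x : Int, (10:Int) ^ e ≤ x → x < 10 ^ (e + 1) → (F x).2 = Gm x)
    (hfst : ∀ x : Int, 0 ≤ x → ((F x).1 = 0 ↔ x < 10 ^ e)) (l : List (List Int))
    (hl : l.map (fun p => (p.headD 0, valueB p)) = (natListP (10 ^ (e + 1))).map F) :
    (l.filter (fun p => p.headD 0 != 0)).map valueB
      = (PySem.List.pyRange ((10:Int) ^ e) ((10:Int) ^ (e + 1)) 1).map Gm := by
  rw [filtmap, hl, List.filter_map]
  have hcast : (((10:Nat) ^ e : Nat) : Int) = (10:Int) ^ e := by push_cast; rfl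
  have hcast1 : (((10:Nat) ^ (e + 1) : Nat) : Int) = (10:Int) ^ (e + 1) := by push_cast; rfl
  have hfc : (natListP (10 ^ (e + 1))).filter ((fun q : Int × Int => q.1 != 0) ∘ F)
      = (natListP (10 ^ (e + 1))).filter (fun x => decide ((((10:Nat) ^ e : Nat) : Int) ≤ x)) := by
    apply List.filter_congr
    intro x hx
    obtain ⟨hx0, _⟩ := mem_natList _ _ hx
    simp only [Function.comp_apply, hcast]
    by_cases hge : (10:Int) ^ e ≤ x
    · have : ¬ (F x).1 = 0 := by rw [hfst x hx0]; omega
      simp [this, hge]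
    · have : (F x).1 = 0 := by rw [hfst x hx0]; omega
      simp [this, hge]
  rw [hfc, natList_filter_ge (10 ^ e) (10 ^ (e + 1))
    (Nat.pow_le_pow_right (by norm_num) (by omega)), List.map_map, hcast, hcast1]
  apply List.map_congr_left
  intro num hnum
  obtain ⟨hlo, hhi⟩ := PySem.List.mem_pyRange_one.mp hnum
  exact hsnd num hlo hhi

theorem cand_odd (e : Nat) :
    ((palsB (2 * (e : Int) + 1)).filter (fun p => p.headD 0 != 0)).map valueB
      = (PySem.List.pyRange ((10:Int) ^ e) ((10:Int) ^ (e + 1)) 1).map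
          (fun num => mirrorA num (PySem.Int.floordiv num 10)) := by
  have hpe : (0:Int) < 10 ^ e := by positivity
  apply cand_core e _ _ ?hsnd ?hfst _ (pals_odd e)
  case hsnd =>
    intro num hlo hhi
    have h0 : (0:Int) ≤ num := by omega
    have ht0 : 0 ≤ num / 10 := Int.ediv_nonneg h0 (by norm_num)
    have htlt : num / 10 < 10 ^ e := by
      rw [Int.ediv_lt_iff_lt_mul (by norm_num)]
      nlinarith [pow_succ (10:Int) e]
    have hcond : (10:Int) ^ e ≤ 10 * (num / 10) ∨ e = 0 := by
      cases e with
      | zero => exact Or.inr rfl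
      | succ e' =>
        left
        have h2 : (10:Int) ^ e' ≤ num / 10 := by
          rw [Int.le_ediv_iff_mul_le (by norm_num)]
          nlinarith [pow_succ (10:Int) e']
        nlinarith [pow_succ (10:Int) e']
    show num * 10 ^ e + revFixP e 0 (num / 10) = mirrorA num (PySem.Int.floordiv num 10)
    rw [PySem.Int.floordiv_eq_ediv_of_pos (by norm_num), mirror_eq,
      ndB_eq_width e (num / 10) ht0 htlt hcond,
      revFix_eq_revGo e 0 (num / 10) ht0 htlt hcond]
  case hfst =>
    intro x hx0
    show x / 10 ^ e = 0 ↔ x < 10 ^ e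
    constructor
    · intro hz
      by_contra hge
      have h1 : 1 ≤ x / (10:Int) ^ e := by
        rw [Int.le_ediv_iff_mul_le hpe]
        omega
      omega
    · intro hlt
      exact Int.ediv_eq_zero_of_lt hx0 hlt

theorem cand_even (e : Nat) :
    ((palsB (2 * (e : Int) + 2)).filter (fun p => p.headD 0 != 0)).map valueB
      = (PySem.List.pyRange ((10:Int) ^ e) ((10:Int) ^ (e + 1)) 1).map
          (fun num => mirrorA num num) := by
  have hpe : (0:Int) < 10 ^ e := by positivity
  apply cand_core e _ _ ?hsnd ?hfst _ (pals_even e)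
  case hsnd =>
    intro num hlo hhi
    have h0 : (0:Int) ≤ num := by omega
    have hcond : (10:Int) ^ (e + 1) ≤ 10 * num ∨ e + 1 = 0 := by
      left
      nlinarith [pow_succ (10:Int) e]
    show num * 10 ^ (e + 1) + revFixP (e + 1) 0 num = mirrorA num num
    rw [mirror_eq, ndB_eq_width (e + 1) num h0 hhi hcond,
      revFix_eq_revGo (e + 1) 0 num h0 hhi hcond]
  case hfst =>
    intro x hx0
    show x / 10 ^ e = 0 ↔ x < 10 ^ e
    constructor
    · intro hz
      by_contra hge
      have h1 : 1 ≤ x / (10:Int) ^ e := by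
        rw [Int.le_ediv_iff_mul_le hpe]
        omega
      omega
    · intro hlt
      exact Int.ediv_eq_zero_of_lt hx0 hlt

-- ----- the inner loops are the processor on the candidate values -----

theorem innerA_eq_proc (k : Int) (hk : 2 ≤ k) (op : Int) :
    ∀ (nums : List Int) (n t : Int), 1 ≤ n → (∀ m ∈ nums, 1 ≤ m) →
      innerA k op nums n t
        = procP k (nums.map (fun num =>
            mirrorA num (if op = 0 then PySem.Int.floordiv num 10 else num))) n t := by
  intro nums
  induction nums with
  | nil => intro n t _ _; rfl
  | cons num rest ih =>
    intro n t hn hmem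
    have hnum := hmem num (by simp)
    simp only [innerA, List.map_cons, procP]
    have ht0 : 0 ≤ (if op = 0 then PySem.Int.floordiv num 10 else num) := by
      split_ifs
      · exact (pvFdFacts 10 num (by norm_num) (by omega)).1
      · omega
    have hw0 : 0 ≤ mirrorA num (if op = 0 then PySem.Int.floordiv num 10 else num) := by
      rw [mirror_eq]
      have h1 := revGo_nonneg 10 0 (if op = 0 then PySem.Int.floordiv num 10 else num)
        le_rfl ht0
      have h2 : (0:Int) < 10 ^ ndB 10 (if op = 0 then PySem.Int.floordiv num 10 else num) := by
        positivity
      nlinarith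
    have hcheck := checkA_iff k
      (mirrorA num (if op = 0 then PySem.Int.floordiv num 10 else num)) hk hw0
    by_cases hc : revB (mirrorA num (if op = 0 then PySem.Int.floordiv num 10 else num)) k
        = mirrorA num (if op = 0 then PySem.Int.floordiv num 10 else num)
    · rw [if_pos (hcheck.mpr hc), if_pos hc]
      by_cases hz : n - 1 = 0
      · rw [if_pos hz, if_pos hz]
      · rw [if_neg hz, if_neg hz]
        exact ih (n - 1) _ (by omega) (fun m hm => hmem m (by simp [hm]))
    · have hcA : checkA k (mirrorA num (if op = 0 then PySem.Int.floordiv num 10 else num))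
          = false := by
        cases hb : checkA k (mirrorA num (if op = 0 then PySem.Int.floordiv num 10 else num))
        · rfl
        · exact absurd (hcheck.mp hb) hc
      rw [hcA, if_neg hc]
      simp only [Bool.false_eq_true, if_false]
      rw [if_neg (show ¬ (n, t).1 = 0 by simp; omega)]
      exact ih n t hn (fun m hm => hmem m (by simp [hm]))

theorem innerB_eq_proc (k : Int) :
    ∀ (ps : List (List Int)) (n t : Int), (∀ p ∈ ps, p ≠ []) →
      innerB k ps n t = procP k ((ps.filter (fun p => p.headD 0 != 0)).map valueB) n t := by
  intro ps
  induction ps with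
  | nil => intro n t _; rfl
  | cons p rest ih =>
    intro n t hne
    cases p with
    | nil => exact absurd rfl (hne [] (by simp))
    | cons a l =>
      simp only [innerB, PySem.List.pyGet?_zero_cons, List.filter_cons, List.headD_cons]
      by_cases ha : a = 0
      · subst ha
        rw [if_pos rfl]
        simp only [bne_self_eq_false, Bool.false_eq_true, if_false]
        exact ih n t (fun q hq => hne q (by simp [hq]))
      · rw [if_neg (by simpa using ha)]
        rw [if_pos (show ((a : Int) != 0) = true by simpa using ha), List.map_cons]
        simp only [procP]
        by_cases hc : revB (valueB (a :: l)) k = valueB (a :: l)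
        · rw [if_pos hc, if_pos hc]
          by_cases hz : n - 1 = 0
          · rw [if_pos hz, if_pos hz]
          · rw [if_neg hz, if_neg hz]
            exact ih (n - 1) _ (fun q hq => hne q (by simp [hq]))
        · rw [if_neg hc, if_neg hc]
          exact ih n t (fun q hq => hne q (by simp [hq]))

theorem procP_fst_nonneg (k : Int) :
    ∀ (vs : List Int) (n t : Int), 1 ≤ n → 0 ≤ (procP k vs n t).1 := by
  intro vs
  induction vs with
  | nil => intro n t hn; simp only [procP]; omega
  | cons v rest ih =>
    intro n t hn
    simp only [procP]
    split_ifs with h1 h2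
    · simp; omega
    · exact ih (n - 1) (t + v) (by omega)
    · exact ih n t hn

-- ----- the decade loops -----

theorem loopA_nonpos (k : Int) (fuel : Nat) (n s a : Int) (hn : n ≤ 0) :
    loopA k fuel n s a = a := by
  cases fuel with
  | zero => rfl
  | succ f => simp only [loopA, if_neg (show ¬ 0 < n by omega)]

theorem loopB_nonpos (k : Int) (fuel : Nat) (n s a : Int) (hn : n ≤ 0) :
    loopB k fuel n s a = a := by
  cases fuel with
  | zero => rfl
  | succ f => simp only [loopB, if_neg (show ¬ 0 < n by omega)]

theorem inner_odd (k : Int) (hk : 2 ≤ k) (e : Nat) (n t : Int) (hn : 1 ≤ n) :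
    innerA k 0 (PySem.List.pyRange ((10:Int) ^ e) (10 * 10 ^ e) 1) n t
      = innerB k (palsB (2 * (e : Int) + 1)) n t := by
  rw [innerA_eq_proc k hk 0 _ n t hn ?mem, innerB_eq_proc k _ n t ?ne, cand_odd e]
  case mem =>
    intro m hm
    have := (PySem.List.mem_pyRange_one.mp hm).1
    have : (0:Int) < 10 ^ e := by positivity
    omega
  case ne => exact palsB_ne_nil _ (by omega)
  rw [show (10:Int) * 10 ^ e = 10 ^ (e + 1) by rw [pow_succ]; ring]
  simp

theorem inner_even (k : Int) (hk : 2 ≤ k) (e : Nat) (n t : Int) (hn : 1 ≤ n) :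
    innerA k 1 (PySem.List.pyRange ((10:Int) ^ e) (10 * 10 ^ e) 1) n t
      = innerB k (palsB (2 * (e : Int) + 2)) n t := by
  rw [innerA_eq_proc k hk 1 _ n t hn ?mem, innerB_eq_proc k _ n t ?ne, cand_even e]
  case mem =>
    intro m hm
    have := (PySem.List.mem_pyRange_one.mp hm).1
    have : (0:Int) < 10 ^ e := by positivity
    omega
  case ne => exact palsB_ne_nil _ (by omega)
  rw [show (10:Int) * 10 ^ e = 10 ^ (e + 1) by rw [pow_succ]; ring]
  simp

theorem innerB_fst_nonneg (k : Int) (L : Int) (hL : 1 ≤ L) (n t : Int) (hn : 1 ≤ n) :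
    0 ≤ (innerB k (palsB L) n t).1 := by
  rw [innerB_eq_proc k _ n t (palsB_ne_nil _ hL)]
  exact procP_fst_nonneg k _ n t hn

theorem loop_eq (k : Int) (hk : 2 ≤ k) :
    ∀ (fuel : Nat) (e : Nat) (n ans : Int),
      loopA k fuel n ((10:Int) ^ e) ans = loopB k (2 * fuel) n (2 * (e : Int) + 1) ans := by
  intro fuel
  induction fuel with
  | zero => intro e n ans; rfl
  | succ f ihf =>
    intro e n ans
    rw [show 2 * (f + 1) = (2 * f + 1) + 1 by ring]
    by_cases hn : 0 < n
    · simp only [loopA, loopB, if_pos hn]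
      rw [if_neg (show ¬ n = 0 by omega), inner_odd k hk e n ans (by omega)]
      set r1 := innerB k (palsB (2 * (e : Int) + 1)) n ans with hr1
      have hr10 : 0 ≤ r1.1 := innerB_fst_nonneg k _ (by omega) n ans (by omega)
      by_cases hz : r1.1 = 0
      · rw [if_pos hz, loopA_nonpos k f _ _ _ (by omega),
          if_neg (show ¬ 0 < r1.1 by omega)]
      · rw [if_neg hz, inner_even k hk e r1.1 r1.2 (by omega),
          if_pos (show 0 < r1.1 by omega),
          show (10:Int) ^ e * 10 = 10 ^ (e + 1) from (pow_succ 10 e).symm,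
          show (2 * (e : Int) + 1) + 1 + 1 = 2 * ((e + 1 : Nat) : Int) + 1 by push_cast; ring]
        exact ihf (e + 1) _ _
    · simp only [loopA, loopB, if_neg hn]

-- ===== VERDICT (by name: the statement is the Claim_ definition above) =====
theorem kMirror_spec : Claim_equal_kMirror := by
  intro k n _ hpre
  unfold Spec_kMirror kMirror kMirror_alt
  rcases hpre with hk | hn
  · have := loop_eq k hk 1000000000 0 n 0
    simpa using this
  · rw [loopA_nonpos k _ n 1 0 hn, loopB_nonpos k _ n 1 0 hn]
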